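-- pv_equiv track=rewrite | github.com/adaball/cw-practice-py | is_interesting.py | is_sequential_dec
-- ===== SOURCE A (Python) =====
-- def is_sequential_dec(number):
--     num_str = str(number)
--
--     i = 0
--     while i <= len(num_str) - 2:
--         curr_str = num_str[i]
--         next_str = num_str[i + 1]
--         expected = str(int(curr_str) - 1)
--
--         if next_str != expected:
--             return False
--
--         i += 1
--
--     return True
-- ===== SOURCE B (Python) =====
-- def is_sequential_dec(number):
--     num_str = str(number)
--     d = int(num_str[0])
--     expected = ''.join(str(d - k) for k in range(len(num_str)))
--     return expected == num_str
-- ===== Notes on version B (the rewrite author's own statement) =====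
-- stated objective: simpler
-- what changed: B replaces A's incremental pairwise while-loop scan (compare each adjacent digit pair via int/str round-trips) with a single construction of the full expected decreasing string from the first digit followed by one equality comparison.
import Mathlib
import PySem

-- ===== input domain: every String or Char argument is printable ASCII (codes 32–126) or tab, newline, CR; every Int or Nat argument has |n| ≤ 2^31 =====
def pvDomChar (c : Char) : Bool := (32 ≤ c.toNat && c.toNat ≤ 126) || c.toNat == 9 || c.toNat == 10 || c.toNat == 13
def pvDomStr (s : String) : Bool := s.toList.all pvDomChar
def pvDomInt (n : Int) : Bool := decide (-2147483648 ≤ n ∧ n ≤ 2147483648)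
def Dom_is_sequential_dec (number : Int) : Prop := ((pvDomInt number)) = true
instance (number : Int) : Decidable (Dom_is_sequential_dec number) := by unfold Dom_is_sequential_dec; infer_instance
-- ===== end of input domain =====

-- B builds the whole expected decreasing string from the first digit and compares once,
-- instead of A's pairwise while-loop scan; same cost, simpler shape.

-- ===== PORT A =====
-- while i <= len(num_str) - 2: compare num_str[i+1] with str(int(num_str[i]) - 1);
-- recursion on the remaining suffix (i advancing by one = dropping the head).
def isdGo : List Char → Bool
  | c :: c' :: t =>
    match PySem.Int.ofChars? [c] with
    | none => false   -- int(curr_str) raises ValueError here; excluded by Pre_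
    | some v =>
      if [c'] ≠ PySem.Int.toChars (v - 1) then false
      else isdGo (c' :: t)
  | _ => true

def is_sequential_dec (number : Int) : Bool :=
  isdGo (PySem.Int.toChars number)

-- ===== PORT B =====
def is_sequential_dec_alt (number : Int) : Bool :=
  let num_str := PySem.Int.toChars number
  match PySem.List.pyGet? num_str 0 with
  | none => false     -- unreachable: str(number) is never empty
  | some c0 =>
    match PySem.Int.ofChars? [c0] with
    | none => false   -- int(num_str[0]) raises ValueError here; excluded by Pre_
    | some d =>
      let expected :=
        ((PySem.List.pyRange 0 (num_str.length : Int) 1).map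
          (fun k => PySem.Int.toChars (d - k))).flatten
      decide (expected = num_str)

-- ===== PRECONDITION & SPEC =====
-- Pre_ excludes exactly the negative inputs: there str(number) starts with '-' and
-- both A and B raise ValueError on int('-').
def Pre_is_sequential_dec (number : Int) : Prop := 0 ≤ number
instance (number : Int) : Decidable (Pre_is_sequential_dec number) := by
  unfold Pre_is_sequential_dec; infer_instance

def pvWitness_is_sequential_dec : Int := 321

def Spec_is_sequential_dec (number : Int) (out : Bool) : Prop := out = is_sequential_dec_alt number
instance (number : Int) (out : Bool) : Decidable (Spec_is_sequential_dec number out) := by unfold Spec_is_sequential_dec; infer_instance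

-- ===== CLAIM (what is proved, stated in full; the proofs are below) =====
def Claim_equal_is_sequential_dec : Prop := ∀ (number : Int), Dom_is_sequential_dec number → Pre_is_sequential_dec number → Spec_is_sequential_dec number (is_sequential_dec number)

-- ===== LEMMAS AND PROOFS =====

-- the numeric value a digit character denotes
def pvVal (c : Char) : Int := (c.toNat : Int) - 48

def pvDigitChars : List Char := ['0','1','2','3','4','5','6','7','8','9']

-- the expected string: toChars d ++ toChars (d-1) ++ … (n blocks)
def pvBexp (d : Int) : Nat → List Char
  | 0 => []
  | n + 1 => PySem.Int.toChars d ++ pvBexp (d - 1) n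

lemma pvBexp_eq (d : Int) (n : Nat) :
    ((List.range n).map (fun (k : Nat) => PySem.Int.toChars (d - (k : Int)))).flatten = pvBexp d n := by
  induction n generalizing d with
  | zero => simp [pvBexp]
  | succ n ih =>
    rw [List.range_succ_eq_map]
    simp only [List.map_cons, List.map_map, List.flatten_cons, pvBexp, Nat.cast_zero, sub_zero]
    rw [← ih (d - 1)]
    refine congrArg₂ (· ++ ·) rfl (congrArg List.flatten (List.map_congr_left fun k _ => ?_))
    simp [Function.comp]
    ring_nf

lemma digit_ofChars (c : Char) (hc : c ∈ pvDigitChars) :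
    PySem.Int.ofChars? [c] = some (pvVal c) := by
  fin_cases hc <;> decide

lemma digit_toChars (c : Char) (hc : c ∈ pvDigitChars) :
    PySem.Int.toChars (pvVal c) = [c] := by
  fin_cases hc <;> decide

lemma digit_pred_eq (c c' : Char) (hc : c ∈ pvDigitChars) (hc' : c' ∈ pvDigitChars) :
    pvVal c' = pvVal c - 1 → PySem.Int.toChars (pvVal c - 1) = [c'] := by
  fin_cases hc <;> fin_cases hc' <;> decide

lemma digit_pred_ne (c c' : Char) (hc : c ∈ pvDigitChars) (hc' : c' ∈ pvDigitChars) :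
    pvVal c' ≠ pvVal c - 1 → (PySem.Int.toChars (pvVal c - 1)).head? ≠ some c' := by
  fin_cases hc <;> fin_cases hc' <;> decide

lemma toChars_pred_ne_nil (c : Char) (hc : c ∈ pvDigitChars) :
    PySem.Int.toChars (pvVal c - 1) ≠ [] := by
  fin_cases hc <;> decide

-- main loop/expected correspondence on digit strings
lemma isdGo_eq_bexp (t : List Char) : ∀ c, c ∈ pvDigitChars → (∀ x ∈ t, x ∈ pvDigitChars) →
    isdGo (c :: t) = decide (pvBexp (pvVal c) (t.length + 1) = c :: t) := by
  induction t with
  | nil =>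
    intro c hc _
    simp [isdGo, pvBexp, digit_toChars c hc]
  | cons c' t' ih =>
    intro c hc ht
    have hc' : c' ∈ pvDigitChars := ht c' (by simp)
    have ht' : ∀ x ∈ t', x ∈ pvDigitChars := fun x hx => ht x (by simp [hx])
    show isdGo (c :: c' :: t') = _
    rw [show isdGo (c :: c' :: t') =
        (match PySem.Int.ofChars? [c] with
         | none => false
         | some v => if [c'] ≠ PySem.Int.toChars (v - 1) then false else isdGo (c' :: t')) from rfl]
    rw [digit_ofChars c hc]
    simp only [pvBexp, digit_toChars c hc, List.length_cons]
    by_cases hvc : pvVal c' = pvVal c - 1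
    · have htc := digit_pred_eq c c' hc hc' hvc
      rw [if_neg (by simp [htc])]
      rw [ih c' hc' ht']
      rw [htc, ← hvc]
      simp [pvBexp, digit_toChars c' hc']
    · have hhd := digit_pred_ne c c' hc hc' hvc
      rw [if_pos (by
        intro h
        apply hhd
        rw [← h]
        rfl)]
      have : pvBexp (pvVal c - 1) (t'.length + 1) ≠ c' :: t' := by
        intro h
        apply hhd
        have hne := toChars_pred_ne_nil c hc
        rw [show pvBexp (pvVal c - 1) (t'.length + 1)
            = PySem.Int.toChars (pvVal c - 1) ++ pvBexp (pvVal c - 1 - 1) t'.length from rfl] at h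
        obtain ⟨a, as, ha⟩ := List.exists_cons_of_ne_nil hne
        rw [ha] at h
        simp at h
        rw [ha]
        simp [h.1]
      simp only [pvBexp] at this
      simp [this]

lemma digitChar_mem (k : Nat) (hk : k < 10) : Nat.digitChar k ∈ pvDigitChars := by
  interval_cases k <;> decide

lemma toDigitsCore_mem (f : Nat) : ∀ (n : Nat) (acc : List Char), ∀ c ∈ Nat.toDigitsCore 10 f n acc,
    c ∈ acc ∨ c ∈ pvDigitChars := by
  induction f with
  | zero => intro n acc c hc; exact Or.inl hc
  | succ f ih =>
    intro n acc c hc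
    rw [Nat.toDigitsCore] at hc
    split at hc
    · rcases List.mem_cons.mp hc with h | h
      · exact Or.inr (h ▸ digitChar_mem _ (Nat.mod_lt _ (by norm_num)))
      · exact Or.inl h
    · rcases ih _ _ _ hc with h | h
      · rcases List.mem_cons.mp h with h | h
        · exact Or.inr (h ▸ digitChar_mem _ (Nat.mod_lt _ (by norm_num)))
        · exact Or.inl h
      · exact Or.inr h

lemma toDigitsCore_ne_nil (f : Nat) : ∀ (n : Nat) (acc : List Char), acc ≠ [] →
    Nat.toDigitsCore 10 f n acc ≠ [] := by
  induction f with
  | zero => intro n acc h; exact h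
  | succ f ih =>
    intro n acc h
    rw [Nat.toDigitsCore]
    split
    · simp
    · exact ih _ _ (by simp)

lemma toDigits_ne_nil (m : Nat) : Nat.toDigits 10 m ≠ [] := by
  rw [Nat.toDigits]
  rw [Nat.toDigitsCore]
  split
  · simp
  · exact toDigitsCore_ne_nil _ _ _ (by simp)

lemma toDigits_mem (m : Nat) : ∀ c ∈ Nat.toDigits 10 m, c ∈ pvDigitChars := by
  intro c hc
  rcases toDigitsCore_mem _ _ _ c hc with h | h
  · simp at h
  · exact h

-- ===== VERDICT (by name: the statement is the Claim_ definition above) =====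
theorem is_sequential_dec_spec : Claim_equal_is_sequential_dec := by
  intro number _ hpre
  unfold Spec_is_sequential_dec is_sequential_dec is_sequential_dec_alt
  have htc : PySem.Int.toChars number = Nat.toDigits 10 number.toNat := by
    rw [PySem.Int.toChars, if_neg (not_lt.mpr hpre)]
  rw [htc]
  obtain ⟨c, t, hl⟩ := List.exists_cons_of_ne_nil (toDigits_ne_nil number.toNat)
  have hdig := toDigits_mem number.toNat
  rw [hl] at hdig ⊢
  have hc : c ∈ pvDigitChars := hdig c (by simp)
  have ht : ∀ x ∈ t, x ∈ pvDigitChars := fun x hx => hdig x (by simp [hx])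
  have hget : PySem.List.pyGet? (c :: t) (0 : Int) = some c := by
    simp [PySem.List.pyGet?, PySem.List.pyIdx?]
  simp only [hget, digit_ofChars c hc]
  rw [show ((c :: t).length : Int) = ((t.length + 1 : Nat) : Int) by simp]
  rw [PySem.List.pyRange_zero_natCast, List.map_map]
  have hcomp : (List.map ((fun k => PySem.Int.toChars (pvVal c - k)) ∘ fun (n : Nat) => (n : Int))
      (List.range (t.length + 1))).flatten
      = ((List.range (t.length + 1)).map
          (fun (k : Nat) => PySem.Int.toChars (pvVal c - (k : Int)))).flatten := rfl
  rw [hcomp, pvBexp_eq]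
  exact isdGo_eq_bexp t c hc ht
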